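-- pv_equiv track=rewrite | github.com/SmitVaishnav/GhostCode | python/ghostcode/transformers/literal_scrubber.py | _is_inside_string
-- ===== SOURCE A (Python) =====
-- def _is_inside_string(source: str, offset: int) -> bool:
--     """Check if offset is inside a string literal."""
--     line_start = source.rfind("\n", 0, offset) + 1
--     line_prefix = source[line_start:offset]
--     # Count unescaped double quotes
--     count = 0
--     i = 0
--     while i < len(line_prefix):
--         if line_prefix[i] == '"' and (i == 0 or line_prefix[i - 1] != "\\"):
--             count += 1
--         i += 1
--     return count % 2 == 1
-- ===== SOURCE B (Python) =====
-- def _is_inside_string(source: str, offset: int) -> bool: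
--     """Check if offset is inside a string literal."""
--     line_start = source.rfind("\n", 0, offset) + 1
--     line_prefix = source[line_start:offset]
--     # quotes minus quotes immediately preceded by a backslash, modulo 2
--     return (line_prefix.count('"') - line_prefix.count('\\"')) % 2 == 1
-- ===== Notes on version B (the rewrite author's own statement) =====
-- stated objective: simpler
-- what changed: Replaces A's index-by-index while loop with its per-character previous-char escape test by two substring counts on the line prefix: count('"') minus count('\"'), taken mod 2.
import Mathlib
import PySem

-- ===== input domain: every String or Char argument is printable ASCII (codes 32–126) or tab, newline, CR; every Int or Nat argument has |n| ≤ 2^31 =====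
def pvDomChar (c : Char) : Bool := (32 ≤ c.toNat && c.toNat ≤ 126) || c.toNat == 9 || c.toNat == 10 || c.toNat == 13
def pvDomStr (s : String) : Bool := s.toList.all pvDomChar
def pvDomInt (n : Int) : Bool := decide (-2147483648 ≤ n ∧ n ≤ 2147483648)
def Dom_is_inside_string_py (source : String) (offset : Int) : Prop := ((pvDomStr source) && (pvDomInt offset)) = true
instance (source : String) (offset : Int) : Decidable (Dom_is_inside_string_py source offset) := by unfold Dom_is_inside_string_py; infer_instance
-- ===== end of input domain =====

-- B replaces A's index-by-index while loop (with its naive "previous char is a backslash"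
-- escape test) by two substring counts on the same line prefix: quotes minus
-- backslash-quote pairs, taken mod 2. Objective: simpler.

-- ===== PORT A =====
-- the while loop of A: index i walks the prefix, counting quotes whose predecessor is not a backslash
def pvALoop (l : List Char) (count : Nat) (i : Nat) : Nat :=
  if h : i < l.length then
    pvALoop l
      (if l[i] = '"' ∧ (i = 0 ∨ l[i-1]! ≠ '\\') then count + 1 else count)
      (i + 1)
  else count
termination_by l.length - i

def is_inside_string_py (source : String) (offset : Int) : Bool :=
  let line_start := PySem.Str.rfindFrom source "\n" 0 (some offset) + 1
  let line_prefix := PySem.Str.slice source (some line_start) (some offset)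
  let count := pvALoop line_prefix.toList 0 0
  count % 2 == 1

-- ===== PORT B =====
def is_inside_string_py_alt (source : String) (offset : Int) : Bool :=
  let line_start := PySem.Str.rfindFrom source "\n" 0 (some offset) + 1
  let line_prefix := PySem.Str.slice source (some line_start) (some offset)
  PySem.Int.mod ((PySem.Str.count line_prefix "\"" : Int) - (PySem.Str.count line_prefix "\\\"" : Int)) 2 == 1

-- ===== PRECONDITION & SPEC =====
def Spec_is_inside_string_py (source : String) (offset : Int) (out : Bool) : Prop := out = is_inside_string_py_alt source offset
instance (source : String) (offset : Int) (out : Bool) : Decidable (Spec_is_inside_string_py source offset out) := by unfold Spec_is_inside_string_py; infer_instance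

-- ===== CLAIM (what is proved, stated in full; the proofs are below) =====
def Claim_equal_is_inside_string_py : Prop := ∀ (source : String) (offset : Int), Dom_is_inside_string_py source offset → Spec_is_inside_string_py source offset (is_inside_string_py source offset)

-- ===== LEMMAS AND PROOFS =====

-- clean structural version of A's loop: prev is the previous character
def pvCntP (prev : Char) : List Char → Nat
  | [] => 0
  | c :: t => (if c = '"' ∧ prev ≠ '\\' then 1 else 0) + pvCntP c t

-- number of backslash-quote pairs (head-based recursion)
def pvEsc : List Char → Nat
  | [] => 0
  | c :: t => (if c = '\\' ∧ t.head? = some '"' then 1 else 0) + pvEsc t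

lemma pvCntP_add_esc (l : List Char) : ∀ prev : Char,
    pvCntP prev l + pvEsc l + (if prev = '\\' ∧ l.head? = some '"' then 1 else 0)
      = l.count '"' := by
  induction l with
  | nil => intro prev; simp [pvCntP, pvEsc]
  | cons c t ih =>
    intro prev
    have := ih c
    rw [pvCntP, pvEsc, List.count_cons]
    by_cases hc : c = '"' <;> by_cases hp : prev = '\\' <;>
      simp [hc, hp] at * <;> omega

-- the A-side while loop equals pvCntP
lemma pvALoop_eq (l : List Char) : ∀ i count, i ≤ l.length →
    pvALoop l count i = count + pvCntP (if i = 0 then 'x' else l[i-1]!) (l.drop i) := by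
  intro i
  induction h : l.length - i generalizing i with
  | zero =>
    intro count hle
    have hi : i = l.length := by omega
    rw [pvALoop]
    simp [hi, pvCntP, List.drop_length]
  | succ n ih =>
    intro count hle
    have hlt : i < l.length := by omega
    rw [pvALoop]
    simp only [hlt, dif_pos]
    rw [ih (i+1) (by omega) _ (by omega)]
    have hdrop : l.drop i = l[i] :: l.drop (i+1) := List.drop_eq_getElem_cons hlt
    rw [hdrop, pvCntP]
    have hgi : l[i]! = l[i] := getElem!_pos l i hlt
    have hsucc : ¬ (i + 1 = 0) := by omega
    simp only [hsucc, Nat.add_sub_cancel, hgi, if_neg, not_false_iff]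
    have hprev : ((if i = 0 then 'x' else l[i-1]!) ≠ '\\') ↔ (i = 0 ∨ l[i-1]! ≠ '\\') := by
      by_cases h0 : i = 0
      · subst h0; simp
      · simp [h0]
    by_cases hcond : l[i] = '"' ∧ (i = 0 ∨ l[i-1]! ≠ '\\')
    · have h2 : l[i] = '"' ∧ (if i = 0 then 'x' else l[i-1]!) ≠ '\\' := ⟨hcond.1, hprev.mpr hcond.2⟩
      rw [if_pos hcond, if_pos h2]
      omega
    · have h2 : ¬ (l[i] = '"' ∧ (if i = 0 then 'x' else l[i-1]!) ≠ '\\') := by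
        intro hx; exact hcond ⟨hx.1, hprev.mp hx.2⟩
      rw [if_neg hcond, if_neg h2]
      omega

-- the B-side single-quote count is List.count
lemma pvCountGo_single (c : Char) : ∀ fuel l acc, l.length ≤ fuel →
    PySem.Chars.count.go [c] fuel l acc = acc + l.count c := by
  intro fuel
  induction fuel with
  | zero =>
    intro l acc h
    cases l with
    | nil => simp [PySem.Chars.count.go]
    | cons d t => simp at h
  | succ n ih =>
    intro l acc h
    cases l with
    | nil => simp [PySem.Chars.count.go]
    | cons d t =>
      rw [PySem.Chars.count.go]
      by_cases hd : d = c
      · subst hd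
        have hpre : List.isPrefixOf [d] (d :: t) = true := by simp [List.isPrefixOf]
        rw [if_pos hpre]
        have hdrop : List.drop ([d].length) (d :: t) = t := by simp
        rw [hdrop, ih t (acc+1) (by simp at h; omega)]
        simp [List.count_cons]
        omega
      · have hpre : ¬ (List.isPrefixOf [c] (d :: t) = true) := by
          simp [List.isPrefixOf]; exact fun hx => absurd hx.symm hd
        rw [if_neg hpre, ih t acc (by simp at h; omega)]
        simp [List.count_cons, hd]

-- the B-side two-char count is pvEsc
lemma pvCountGo_pair : ∀ fuel l acc, l.length ≤ fuel →
    PySem.Chars.count.go ['\\', '"'] fuel l acc = acc + pvEsc l := by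
  intro fuel
  induction fuel with
  | zero =>
    intro l acc h
    cases l with
    | nil => simp [PySem.Chars.count.go, pvEsc]
    | cons d t => simp at h
  | succ n ih =>
    intro l acc h
    cases l with
    | nil => simp [PySem.Chars.count.go, pvEsc]
    | cons d t =>
      rw [PySem.Chars.count.go]
      by_cases hpre : List.isPrefixOf ['\\', '"'] (d :: t) = true
      · obtain ⟨hd, t', ht⟩ : d = '\\' ∧ ∃ t', t = '"' :: t' := by
          cases t with
          | nil => simp [List.isPrefixOf] at hpre
          | cons e t' =>
            simp [List.isPrefixOf] at hpre
            exact ⟨hpre.1.symm, t', by rw [← hpre.2]⟩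
        subst hd; subst ht
        rw [if_pos hpre]
        have hdrop : List.drop (['\\','"'].length) ('\\' :: '"' :: t') = t' := by simp
        rw [hdrop, ih t' (acc+1) (by simp at h; omega)]
        simp [pvEsc]
        omega
      · rw [if_neg hpre, ih t acc (by simp at h; omega)]
        have hne : ¬ (d = '\\' ∧ t.head? = some '"') := by
          intro hx
          obtain ⟨h1, h2⟩ := hx
          subst h1
          cases t with
          | nil => simp at h2
          | cons e t' =>
            simp at h2
            subst h2
            simp [List.isPrefixOf] at hpre
        rw [pvEsc, if_neg hne]
        omega

-- main list-level fact: the loop count; its parity test matches B's arithmetic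
lemma pvEsc_le_count (l : List Char) : pvEsc l ≤ l.count '"' := by
  have := pvCntP_add_esc l 'x'
  simp at this
  omega

lemma pv_main (l : List Char) :
    (pvALoop l 0 0 : Int) = (l.count '"' : Int) - (pvEsc l : Int) := by
  have h1 := pvALoop_eq l 0 0 (Nat.zero_le _)
  have h2 := pvCntP_add_esc l 'x'
  have h3 : ¬ (('x' : Char) = '\\' ∧ l.head? = some '"') := by
    intro hx; exact absurd hx.1 (by decide)
  rw [if_neg h3] at h2
  norm_num at h1
  have h4 := pvEsc_le_count l
  omega

lemma pv_count_single (l : List Char) : PySem.Chars.count l ['"'] = l.count '"' := by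
  rw [PySem.Chars.count]
  simp only [List.isEmpty_cons, if_false, Bool.false_eq_true]
  rw [pvCountGo_single '"' l.length l 0 le_rfl]
  omega

lemma pv_count_pair (l : List Char) : PySem.Chars.count l ['\\', '"'] = pvEsc l := by
  rw [PySem.Chars.count]
  simp only [List.isEmpty_cons, if_false, Bool.false_eq_true]
  rw [pvCountGo_pair l.length l 0 le_rfl]
  omega

-- ===== VERDICT (by name: the statement is the Claim_ definition above) =====
theorem is_inside_string_py_spec : Claim_equal_is_inside_string_py := by
  intro source offset _
  unfold Spec_is_inside_string_py is_inside_string_py is_inside_string_py_alt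
  simp only [PySem.Str.count, String.toList_ofList, PySem.Str.slice]
  set l := PySem.Chars.slice source.toList (some (PySem.Str.rfindFrom source "\n" 0 (some offset) + 1)) (some offset) with hl
  rw [show ("\"" : String).toList = ['"'] from rfl,
     show ("\\\"" : String).toList = ['\\','"'] from rfl]
  rw [pv_count_single, pv_count_pair]
  have hm := pv_main l
  have hle := pvEsc_le_count l
  have hmod : PySem.Int.mod ((l.count '"' : Int) - (pvEsc l : Int)) 2
      = ((pvALoop l 0 0 : Int)) % 2 := by
    rw [← hm, PySem.Int.mod, Int.fmod_eq_emod]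
    norm_num
  rw [hmod]
  have : ((pvALoop l 0 0 : Int)) % 2 = ((pvALoop l 0 0 % 2 : Nat) : Int) := by
    push_cast; ring_nf
  rw [this]
  cases h : pvALoop l 0 0 % 2 == 1
  · simp at h ⊢
    omega
  · simp at h ⊢
    omega
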